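-- pv_equiv track=rewrite | github.com/balatharunr/OptiSys | tools/suggest_catalog_fixes.py | resolve_search_managers
-- ===== SOURCE A (Python) =====
-- from typing import Dict, Iterable, List, Optional, Sequence, Tuple
--
-- SEARCH_CLI = {
--     "winget": "winget",
--     "choco": "choco",
--     "chocolatey": "choco",
--     "scoop": "scoop",
-- }
--
-- def resolve_search_managers(search_managers: Sequence[str]) -> List[str]:
--     if search_managers:
--         resolved = []
--         for item in search_managers:
--             key = item.lower()
--             if key in SEARCH_CLI:
--                 value = SEARCH_CLI[key]
--                 resolved.append("choco" if value == "choco" else key)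
--         return sorted(set(resolved), key=lambda m: (m != "winget", m))
--     return ["winget", "choco", "scoop"]
-- ===== SOURCE B (Python) =====
-- SEARCH_CLI = {
--     "winget": "winget",
--     "choco": "choco",
--     "chocolatey": "choco",
--     "scoop": "scoop",
-- }
--
-- def resolve_search_managers(search_managers):
--     if not search_managers:
--         return ["winget", "choco", "scoop"]
--     present = {SEARCH_CLI[item.lower()] for item in search_managers
--                if item.lower() in SEARCH_CLI}
--     return [name for name in ("winget", "choco", "scoop") if name in present]
-- ===== Notes on version B (the rewrite author's own statement) =====
-- stated objective: simpler
-- what changed: B drops A's per-item key rewriting plus sorted(set(...), key=...) and instead collects the dict values that occur into a set, then filters the fixed ordered three-name catalog by membership, so no sort and no custom sort key are needed.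
import Mathlib
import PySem

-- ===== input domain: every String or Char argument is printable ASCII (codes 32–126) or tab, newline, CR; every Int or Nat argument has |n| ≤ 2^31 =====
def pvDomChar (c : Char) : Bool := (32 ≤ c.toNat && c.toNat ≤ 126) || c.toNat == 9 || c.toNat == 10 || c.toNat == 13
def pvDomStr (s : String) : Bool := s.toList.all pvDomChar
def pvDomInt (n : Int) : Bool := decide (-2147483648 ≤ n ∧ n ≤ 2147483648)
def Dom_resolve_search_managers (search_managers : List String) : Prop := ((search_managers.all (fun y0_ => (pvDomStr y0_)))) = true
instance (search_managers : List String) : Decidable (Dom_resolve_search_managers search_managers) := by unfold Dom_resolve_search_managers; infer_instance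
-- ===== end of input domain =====

-- B replaces A's sort-with-custom-key over the deduplicated matches by a single
-- membership filter over the fixed ordered three-name catalog — simpler, no sort and no custom key.

-- ===== PORT A =====
-- module-level constant SEARCH_CLI (a dict, insertion order)
def pvSearchCli : PySem.Dict String String :=
  (((PySem.Dict.empty.insert "winget" "winget").insert "choco" "choco").insert "chocolatey" "choco").insert "scoop" "scoop"

-- the body of A's for-loop: 'key = item.lower(); if key in SEARCH_CLI: value = SEARCH_CLI[key];
-- resolved.append("choco" if value == "choco" else key)' — membership test + indexing ported as one lookup (exact)
def pvStepA (acc : List String) (item : String) : List String :=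
  let key := PySem.Str.lower item
  match pvSearchCli.get? key with
  | some value => acc ++ [if value == "choco" then "choco" else key]
  | none => acc

def resolve_search_managers (search_managers : List String) : List String :=
  if search_managers ≠ [] then
    let resolved := search_managers.foldl pvStepA []
    -- sorted(set(resolved), key=lambda m: (m != "winget", m))
    PySem.List.sorted2 (PySem.Set.ofList resolved) (fun m => m != "winget") (fun m => m) false
  else ["winget", "choco", "scoop"]

-- ===== PORT B =====
def resolve_search_managers_alt (search_managers : List String) : List String :=
  if search_managers = [] then ["winget", "choco", "scoop"]
  else
    let present : PySem.Set String := PySem.Set.ofList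
      (search_managers.filterMap (fun item => pvSearchCli.get? (PySem.Str.lower item)))
    ["winget", "choco", "scoop"].filter (fun name => PySem.Set.contains present name)

-- ===== PRECONDITION & SPEC =====
def Spec_resolve_search_managers (search_managers : List String) (out : List String) : Prop := out = resolve_search_managers_alt search_managers
instance (search_managers : List String) (out : List String) : Decidable (Spec_resolve_search_managers search_managers out) := by unfold Spec_resolve_search_managers; infer_instance

-- ===== CLAIM (what is proved, stated in full; the proofs are below) =====
def Claim_equal_resolve_search_managers : Prop := ∀ (search_managers : List String), Dom_resolve_search_managers search_managers → Spec_resolve_search_managers search_managers (resolve_search_managers search_managers)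

-- ===== LEMMAS AND PROOFS =====

-- any value SEARCH_CLI can return is one of the three canonical names
lemma searchCli_value {k v : String} (h : pvSearchCli.get? k = some v) :
    v = "winget" ∨ v = "choco" ∨ v = "scoop" := by
  simp [pvSearchCli, PySem.Dict.get?, PySem.Dict.insert, PySem.Dict.empty] at h
  obtain ⟨a, h⟩ := h
  rcases h with ⟨-, -, rfl⟩ | ⟨-, ⟨-, -, rfl⟩ | ⟨-, ⟨-, -, rfl⟩ | ⟨-, -, -, rfl⟩⟩⟩ <;> simp

-- A's appended element ("choco" if value == "choco" else key) is exactly the dict value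
lemma searchCli_branch {k v : String} (h : pvSearchCli.get? k = some v) :
    (if v == "choco" then "choco" else k) = v := by
  simp [pvSearchCli, PySem.Dict.get?, PySem.Dict.insert, PySem.Dict.empty] at h
  obtain ⟨a, h⟩ := h
  rcases h with ⟨rfl, -, rfl⟩ | ⟨-, ⟨rfl, -, rfl⟩ | ⟨-, ⟨rfl, -, rfl⟩ | ⟨-, rfl, -, rfl⟩⟩⟩ <;> simp

-- A's accumulation loop builds exactly B's list of looked-up values
lemma resolved_eq_filterMap (xs : List String) (acc : List String) :
    xs.foldl pvStepA acc
      = acc ++ xs.filterMap (fun item => pvSearchCli.get? (PySem.Str.lower item)) := by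
  induction xs generalizing acc with
  | nil => simp
  | cons x t ih =>
    rw [List.foldl_cons, List.filterMap_cons, ih]
    cases hx : pvSearchCli.get? (PySem.Str.lower x) with
    | none => simp [pvStepA, hx]
    | some v =>
      simp only [pvStepA, hx]
      simpa using searchCli_branch hx

-- sorting a duplicate-free list of canonical names by (m != "winget", m)
-- is the membership filter of the fixed ordered catalog
lemma sorted2_canonical (l : List String) (hnd : l.Nodup)
    (hmem : ∀ x ∈ l, x = "winget" ∨ x = "choco" ∨ x = "scoop") :
    PySem.List.sorted2 l (fun m => m != "winget") (fun m => m) false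
      = ["winget", "choco", "scoop"].filter (fun name => PySem.Set.contains l name) := by
  have hsub : l ⊆ ["winget", "choco", "scoop"] := by
    intro x hx; rcases hmem x hx with rfl | rfl | rfl <;> simp
  have hlen : l.length ≤ 3 := by
    simpa using (hnd.subperm hsub).length_le
  match l, hnd, hmem, hlen with
  | [], _, _, _ => decide
  | [a], hnd, hmem, _ =>
    rcases hmem a (by simp) with rfl | rfl | rfl <;>
      simp [PySem.List.sorted2, PySem.List.insertBy]
  | [a, b], hnd, hmem, _ =>
    rcases hmem a (by simp) with rfl | rfl | rfl <;>
      rcases hmem b (by simp) with rfl | rfl | rfl <;>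
        simp_all [PySem.List.sorted2, PySem.List.insertBy, String.lt_iff_toList_lt, Bool.lt_iff,
          show (['c','h','o','c','o'] < ['s','c','o','o','p']) = True by decide,
          show (['c','h','o','c','o'] < ['w','i','n','g','e','t']) = True by decide,
          show (['s','c','o','o','p'] < ['w','i','n','g','e','t']) = True by decide,
          show (['s','c','o','o','p'] < ['c','h','o','c','o']) = False by decide,
          show (['w','i','n','g','e','t'] < ['c','h','o','c','o']) = False by decide,
          show (['w','i','n','g','e','t'] < ['s','c','o','o','p']) = False by decide]
  | [a, b, c], hnd, hmem, _ =>
    rcases hmem a (by simp) with rfl | rfl | rfl <;>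
      rcases hmem b (by simp) with rfl | rfl | rfl <;>
        rcases hmem c (by simp) with rfl | rfl | rfl <;>
          simp_all [PySem.List.sorted2, PySem.List.insertBy, String.lt_iff_toList_lt, Bool.lt_iff,
          show (['c','h','o','c','o'] < ['s','c','o','o','p']) = True by decide,
          show (['c','h','o','c','o'] < ['w','i','n','g','e','t']) = True by decide,
          show (['s','c','o','o','p'] < ['w','i','n','g','e','t']) = True by decide,
          show (['s','c','o','o','p'] < ['c','h','o','c','o']) = False by decide,
          show (['w','i','n','g','e','t'] < ['c','h','o','c','o']) = False by decide,
          show (['w','i','n','g','e','t'] < ['s','c','o','o','p']) = False by decide]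
  | a :: b :: c :: d :: t, _, _, hlen => simp at hlen; omega

-- ===== VERDICT (by name: the statement is the Claim_ definition above) =====
theorem resolve_search_managers_spec : Claim_equal_resolve_search_managers := by
  intro xs _
  unfold Spec_resolve_search_managers resolve_search_managers resolve_search_managers_alt
  by_cases hxs : xs = []
  · simp [hxs]
  · simp only [hxs, ne_eq, not_false_eq_true, if_true, if_false]
    rw [resolved_eq_filterMap, List.nil_append]
    exact sorted2_canonical _ (PySem.Set.nodup_ofList _) (by
      intro x hx
      rw [PySem.Set.mem_ofList] at hx
      obtain ⟨item, -, hi⟩ := List.mem_filterMap.mp hx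
      exact searchCli_value hi)
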